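-- pv_equiv track=rewrite | github.com/TailoredAgents/socialmedia2 | backend/services/twitter_service.py | _distribute_media_across_thread
-- ===== SOURCE A (Python) =====
-- from typing import Dict, List, Optional, Any, Tuple
--
-- def _distribute_media_across_thread(media_ids: List[str], tweet_count: int) -> List[List[str]]:
--     """Distribute media IDs across thread tweets"""
--     if not media_ids:
--         return [[] for _ in range(tweet_count)]
--
--     media_per_tweet = [[] for _ in range(tweet_count)]
--
--     # Put media in first tweet by default, distribute if many media files
--     if len(media_ids) <= 4:  # Twitter's media limit per tweet
--         media_per_tweet[0] = media_ids
--     else: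
--         # Distribute across multiple tweets
--         media_per_chunk = 4
--         for i, media_id in enumerate(media_ids):
--             tweet_index = min(i // media_per_chunk, tweet_count - 1)
--             if len(media_per_tweet[tweet_index]) < 4:
--                 media_per_tweet[tweet_index].append(media_id)
--
--     return media_per_tweet
-- ===== SOURCE B (Python) =====
-- def _distribute_media_across_thread(media_ids, tweet_count):
--     """Distribute media IDs across thread tweets (block-of-4 slicing per tweet)."""
--     return [media_ids[4 * t:4 * t + 4] for t in range(tweet_count)]
-- ===== Notes on version B (the rewrite author's own statement) =====
-- stated objective: simpler
-- what changed: Replaced A's special len<=4 branch plus item-by-item enumerate/min/append distribution with a single per-tweet slicing comprehension media_ids[4*t:4*t+4].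
import Mathlib
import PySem

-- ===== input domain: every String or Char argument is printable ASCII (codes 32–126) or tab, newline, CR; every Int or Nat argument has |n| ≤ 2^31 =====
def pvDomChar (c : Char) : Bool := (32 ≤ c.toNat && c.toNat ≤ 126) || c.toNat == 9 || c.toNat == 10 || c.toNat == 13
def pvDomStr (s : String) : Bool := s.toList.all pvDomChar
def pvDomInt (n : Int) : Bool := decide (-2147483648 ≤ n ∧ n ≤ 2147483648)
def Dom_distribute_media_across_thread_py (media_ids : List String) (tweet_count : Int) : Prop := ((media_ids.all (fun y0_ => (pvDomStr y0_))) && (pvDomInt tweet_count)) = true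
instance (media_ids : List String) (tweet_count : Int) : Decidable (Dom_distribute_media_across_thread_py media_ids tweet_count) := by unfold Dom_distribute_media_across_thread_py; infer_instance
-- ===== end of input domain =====

-- B replaces A's len<=4 branch + item-by-item enumerate/min/append loop by one per-tweet
-- slicing comprehension media_ids[4*t:4*t+4] (objective: simpler; return value only).

-- ===== PORT A =====
def distribute_media_across_thread_py (media_ids : List String) (tweet_count : Int) : List (List String) :=
  if media_ids = [] then
    (PySem.List.pyRange 0 tweet_count 1).map (fun _ => ([] : List String))
  else
    let media_per_tweet := (PySem.List.pyRange 0 tweet_count 1).map (fun _ => ([] : List String))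
    if (media_ids.length : Int) ≤ 4 then
      PySem.List.pySetD media_per_tweet 0 media_ids
    else
      -- for i, media_id in enumerate(media_ids): …
      (PySem.List.enumerate media_ids 0).foldl (fun mpt p =>
        let tweet_index := min (PySem.Int.floordiv p.1 4) (tweet_count - 1)
        if (PySem.List.pyGetD mpt tweet_index []).length < 4 then
          PySem.List.pySetD mpt tweet_index ((PySem.List.pyGetD mpt tweet_index []) ++ [p.2])
        else mpt) media_per_tweet

-- ===== PORT B =====
def distribute_media_across_thread_py_alt (media_ids : List String) (tweet_count : Int) : List (List String) :=
  (PySem.List.pyRange 0 tweet_count 1).map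
    (fun t => PySem.List.slice media_ids (some (4 * t)) (some (4 * t + 4)))

-- ===== PRECONDITION & SPEC =====
-- Pre_ excludes exactly the inputs on which A raises IndexError (nonempty media with tweet_count ≤ 0).
def Pre_distribute_media_across_thread_py (media_ids : List String) (tweet_count : Int) : Prop :=
  media_ids = [] ∨ 1 ≤ tweet_count
instance (media_ids : List String) (tweet_count : Int) : Decidable (Pre_distribute_media_across_thread_py media_ids tweet_count) := by unfold Pre_distribute_media_across_thread_py; infer_instance

def pvWitness_distribute_media_across_thread_py : List String × Int := (["m1", "m2", "m3", "m4", "m5"], 2)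

def Spec_distribute_media_across_thread_py (media_ids : List String) (tweet_count : Int) (out : List (List String)) : Prop := out = distribute_media_across_thread_py_alt media_ids tweet_count
instance (media_ids : List String) (tweet_count : Int) (out : List (List String)) : Decidable (Spec_distribute_media_across_thread_py media_ids tweet_count out) := by unfold Spec_distribute_media_across_thread_py; infer_instance

-- ===== CLAIM (what is proved, stated in full; the proofs are below) =====
def Claim_equal_distribute_media_across_thread_py : Prop := ∀ (media_ids : List String) (tweet_count : Int), Dom_distribute_media_across_thread_py media_ids tweet_count → Pre_distribute_media_across_thread_py media_ids tweet_count → Spec_distribute_media_across_thread_py media_ids tweet_count (distribute_media_across_thread_py media_ids tweet_count)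


-- ===== LEMMAS AND PROOFS =====

-- the per-tweet chunk view of the loop state after consuming k items
def pvChunkState (media : List String) (n k : Nat) : List (List String) :=
  (List.range n).map (fun t => (media.drop (4 * t)).take (min 4 (k - 4 * t)))

theorem pvAlt_closed (media : List String) (tc : Int) (h : 0 ≤ tc) :
    distribute_media_across_thread_py_alt media tc
      = (List.range tc.toNat).map (fun t => (media.drop (4 * t)).take 4) := by
  unfold distribute_media_across_thread_py_alt
  rw [PySem.List.pyRange_one, List.map_map]
  simp only [Int.sub_zero]
  apply List.map_congr_left
  intro k _
  simp only [Function.comp]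
  have h1 : (4 : Int) * (0 + (k : Int)) = ((4 * k : Nat) : Int) := by push_cast; ring
  have h2 : (4 : Int) * (0 + (k : Int)) + 4 = ((4 * k + 4 : Nat) : Int) := by push_cast; ring
  rw [h2, h1, PySem.List.slice_natCast]
  congr 1
  omega

theorem pvInit_state (media : List String) (tc : Int) (h : 0 ≤ tc) :
    (PySem.List.pyRange 0 tc 1).map (fun _ => ([] : List String))
      = pvChunkState media tc.toNat 0 := by
  rw [PySem.List.pyRange_one, List.map_map]
  simp only [Int.sub_zero]
  unfold pvChunkState
  apply List.map_congr_left
  intro k _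
  simp

theorem pvChunkState_getD (media : List String) (n k t : Nat) (ht : t < n) :
    (pvChunkState media n k).getD t [] = (media.drop (4 * t)).take (min 4 (k - 4 * t)) := by
  unfold pvChunkState
  rw [List.getD_eq_getElem?_getD, List.getElem?_map, List.getElem?_range ht]
  rfl

theorem pvChunkState_step (media : List String) (n k : Nat) (hn : 1 ≤ n) (hk : k < media.length) :
    (let tweet_index := min (PySem.Int.floordiv (k : Int) 4) ((n : Int) - 1);
     if (PySem.List.pyGetD (pvChunkState media n k) tweet_index ([] : List String)).length < 4 then
       PySem.List.pySetD (pvChunkState media n k) tweet_index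
         ((PySem.List.pyGetD (pvChunkState media n k) tweet_index ([] : List String)) ++ [media[k]])
     else pvChunkState media n k)
      = pvChunkState media n (k + 1) := by
  have hdiv : PySem.Int.floordiv (k : Int) 4 = ((k / 4 : Nat) : Int) := by
    exact_mod_cast PySem.Int.floordiv_natCast k 4
  set t0 : Nat := min (k / 4) (n - 1) with ht0
  have hti : min (PySem.Int.floordiv (k : Int) 4) ((n : Int) - 1) = ((t0 : Int)) := by
    rw [hdiv]; omega
  have ht0n : t0 < n := by omega
  have hget : PySem.List.pyGetD (pvChunkState media n k) ((t0 : Int)) ([] : List String)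
      = (media.drop (4 * t0)).take (min 4 (k - 4 * t0)) := by
    rw [PySem.List.pyGetD_natCast, pvChunkState_getD media n k t0 ht0n]
  simp only [hti, hget]
  by_cases hcase : k / 4 ≤ n - 1
  · -- t0 = k / 4 : the item is appended to chunk t0
    have ht0eq : t0 = k / 4 := by omega
    have hklt : k - 4 * t0 < 4 := by omega
    have h4le : 4 * t0 ≤ k := by omega
    have hlen : ((media.drop (4 * t0)).take (min 4 (k - 4 * t0))).length < 4 := by
      rw [List.length_take]; omega
    rw [if_pos hlen, PySem.List.pySetD_natCast]
    unfold pvChunkState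
    apply List.ext_getElem
    · simp
    · intro i hi1 hi2
      simp only [List.length_set, List.length_map, List.length_range] at hi1 hi2
      rw [List.getElem_set]
      by_cases hit : t0 = i
      · rw [if_pos hit]
        subst hit
        simp only [List.getElem_map, List.getElem_range]
        have hmin1 : min 4 (k - 4 * t0) = k - 4 * t0 := by omega
        have hmin2 : min 4 (k + 1 - 4 * t0) = (k - 4 * t0) + 1 := by omega
        rw [hmin1, hmin2, List.take_succ]
        have hm : k - 4 * t0 < (media.drop (4 * t0)).length := by
          rw [List.length_drop]; omega
        have hik : 4 * t0 + (k - 4 * t0) = k := by omega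
        rw [List.getElem?_eq_getElem hm]
        simp [List.getElem_drop, hik]
      · rw [if_neg hit]
        simp only [List.getElem_map, List.getElem_range]
        -- other chunks unchanged: either fully filled (4*i+4 ≤ k) or untouched (k < 4*i)
        have : min 4 (k - 4 * i) = min 4 (k + 1 - 4 * i) := by
          by_cases hlt : i < t0
          · omega
          · have h1 : t0 < i := by omega
            have : 4 * t0 + 4 ≤ 4 * i := by omega
            omega
        rw [this]
  · -- t0 = n - 1 and k ≥ 4 * n : chunk is full, state unchanged
    have ht0eq : t0 = n - 1 := by omega
    have hk4n : 4 * n ≤ k := by omega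
    have hlen : ¬ ((media.drop (4 * t0)).take (min 4 (k - 4 * t0))).length < 4 := by
      rw [List.length_take, List.length_drop]
      omega
    rw [if_neg hlen]
    unfold pvChunkState
    apply List.map_congr_left
    intro t htmem
    have htn : t < n := List.mem_range.mp htmem
    have : min 4 (k - 4 * t) = min 4 (k + 1 - 4 * t) := by omega
    rw [this]

theorem pvChunkState_stable (media : List String) (n k : Nat) (hk : media.length ≤ k) :
    pvChunkState media n k = pvChunkState media n media.length := by
  unfold pvChunkState
  apply List.map_congr_left
  intro t _
  have hlen : (media.drop (4 * t)).length = media.length - 4 * t := by simp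
  by_cases h4 : 4 ≤ media.length - 4 * t
  · have h1 : min 4 (k - 4 * t) = 4 := by omega
    have h2 : min 4 (media.length - 4 * t) = 4 := by omega
    rw [h1, h2]
  · rw [List.take_of_length_le (by omega), List.take_of_length_le (by omega)]

theorem pvLoop_inv (media : List String) (n : Nat) (hn : 1 ≤ n) :
    ∀ (rest : List String) (k : Nat), media.drop k = rest →
    (PySem.List.enumerate rest (k : Int)).foldl (fun mpt p =>
        let tweet_index := min (PySem.Int.floordiv p.1 4) ((n : Int) - 1)
        if (PySem.List.pyGetD mpt tweet_index ([] : List String)).length < 4 then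
          PySem.List.pySetD mpt tweet_index ((PySem.List.pyGetD mpt tweet_index ([] : List String)) ++ [p.2])
        else mpt) (pvChunkState media n k)
      = pvChunkState media n media.length := by
  intro rest
  induction rest with
  | nil =>
    intro k hdrop
    have hk : media.length ≤ k := List.drop_eq_nil_iff.mp hdrop
    rw [PySem.List.enumerate_nil, List.foldl_nil, pvChunkState_stable media n k hk]
  | cons x rest ih =>
    intro k hdrop
    have hk : k < media.length := by
      by_contra h
      rw [List.drop_eq_nil_of_le (by omega)] at hdrop
      exact List.cons_ne_nil x rest hdrop.symm
    have hcons := List.drop_eq_getElem_cons hk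
    rw [hdrop] at hcons
    injection hcons with h1 h2
    have hx : media[k] = x := h1.symm
    have hrest : media.drop (k + 1) = rest := h2.symm
    rw [PySem.List.enumerate_cons, List.foldl_cons]
    have hstep := pvChunkState_step media n k hn hk
    simp only [hx] at hstep
    simp only [hstep]
    have : (k : Int) + 1 = ((k + 1 : Nat) : Int) := by push_cast; ring
    rw [this]
    exact ih (k + 1) hrest

theorem pvFinal_chunks (media : List String) (n : Nat) :
    pvChunkState media n media.length = (List.range n).map (fun t => (media.drop (4 * t)).take 4) := by
  unfold pvChunkState
  apply List.map_congr_left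
  intro t _
  have hlen : (media.drop (4 * t)).length = media.length - 4 * t := by simp
  by_cases h : 4 ≤ media.length - 4 * t
  · rw [min_eq_left h]
  · rw [min_eq_right (by omega), List.take_of_length_le (by omega), List.take_of_length_le (by omega)]

-- ===== VERDICT (by name: the statement is the Claim_ definition above) =====
theorem distribute_media_across_thread_py_spec : Claim_equal_distribute_media_across_thread_py := by
  intro media tc _ hpre
  unfold Spec_distribute_media_across_thread_py
  unfold distribute_media_across_thread_py
  by_cases hm : media = []
  · subst hm
    rw [if_pos rfl]
    unfold distribute_media_across_thread_py_alt
    apply List.map_congr_left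
    intro t _
    simp [PySem.List.slice]
  · have htc : 1 ≤ tc := by
      rcases hpre with h | h
      · exact absurd h hm
      · exact h
    have htc0 : 0 ≤ tc := by omega
    have htn := Int.toNat_of_nonneg (by omega : (0:Int) ≤ tc)
    have hn : 1 ≤ tc.toNat := by omega
    rw [if_neg hm, pvAlt_closed media tc htc0]
    by_cases hle : (media.length : Int) ≤ 4
    · rw [if_pos hle]
      rw [pvInit_state media tc htc0]
      have h0 : (0 : Int) = ((0 : Nat) : Int) := rfl
      rw [h0, PySem.List.pySetD_natCast]
      apply List.ext_getElem
      · simp [pvChunkState]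
      · intro i hi1 hi2
        unfold pvChunkState
        simp only [List.length_map, List.length_range] at hi2
        rw [List.getElem_set]
        by_cases hi0 : (0 : Nat) = i
        · rw [if_pos hi0]
          subst hi0
          simp only [List.getElem_map, List.getElem_range, Nat.mul_zero, List.drop_zero]
          rw [List.take_of_length_le (by omega : media.length ≤ 4)]
        · rw [if_neg hi0]
          simp only [List.getElem_map, List.getElem_range]
          have h4 : media.length ≤ 4 * i := by omega
          rw [List.drop_eq_nil_of_le h4]
          simp
    · rw [if_neg hle]
      rw [pvInit_state media tc htc0]
      have hloop := pvLoop_inv media tc.toNat hn media 0 (by simp)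
      simp only [Nat.cast_zero] at hloop
      have hcast : ((tc.toNat : Int)) - 1 = tc - 1 := by rw [htn]
      rw [← hcast]
      rw [hloop, pvFinal_chunks]
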